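-- pv_equiv track=rewrite | github.com/lstama/congak | problem_generator.py | next_possible
-- ===== SOURCE A (Python) =====
-- def next_possible(arr: list, type_arr: list):
--     now = len(arr) - 1
--     plus = True
--     while now >= 0:
--         if plus:
--             plus = False
--             arr[now] += 1
--             if arr[now] == 10:
--                 if type_arr[now] == 'x':
--                     arr[now] = 1
--                 else:
--                     arr[now] = 0
--                 plus = True
--         now -= 1
--     if plus:
--         return -1
--     return arr
-- ===== SOURCE B (Python) =====
-- def next_possible(arr: list, type_arr: list):
--     def inc(lo, hi):
--         # increment the segment arr[lo:hi]; True iff the carry leaves index lo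
--         if hi - lo == 1:
--             arr[lo] += 1
--             if arr[lo] == 10:
--                 arr[lo] = 1 if type_arr[lo] == 'x' else 0
--                 return True
--             return False
--         mid = (lo + hi) // 2
--         if inc(mid, hi):
--             return inc(lo, mid)
--         return False
--     if not arr or inc(0, len(arr)):
--         return -1
--     return arr
-- ===== Notes on version B (the rewrite author's own statement) =====
-- stated objective: alternative
-- what changed: A threads a carry flag through one linear right-to-left pass over every index; B is a divide-and-conquer recursion inc(lo,hi) on segment halves that increments the right half and recurses into the left half only if the right half overflowed, so untouched left halves are never visited. Pre_ excludes inputs where A raises IndexError (carry suffix longer than type_arr) and the all-9/empty arrays, on which A returns the int -1 instead of a list (B returns -1 there too, with the same in-place resets).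
-- outside the precondition, e.g. on next_possible([9, 9], ['x', 'y']): A returns -1, B returns -1; on next_possible([], []): A returns -1, B returns -1
import Mathlib
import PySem

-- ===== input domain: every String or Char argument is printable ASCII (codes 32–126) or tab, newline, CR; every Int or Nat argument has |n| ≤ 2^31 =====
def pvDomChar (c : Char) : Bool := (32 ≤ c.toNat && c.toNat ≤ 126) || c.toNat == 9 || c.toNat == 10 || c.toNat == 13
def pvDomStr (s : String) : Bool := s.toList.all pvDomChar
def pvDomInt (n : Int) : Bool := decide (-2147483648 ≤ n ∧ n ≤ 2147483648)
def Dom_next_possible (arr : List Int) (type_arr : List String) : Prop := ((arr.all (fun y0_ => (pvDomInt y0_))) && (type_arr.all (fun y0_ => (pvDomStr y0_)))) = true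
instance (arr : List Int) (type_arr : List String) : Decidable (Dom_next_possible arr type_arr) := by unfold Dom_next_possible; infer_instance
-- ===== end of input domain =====

-- B replaces A's linear carry-flag pass over every index by a divide-and-conquer recursion on
-- halves that skips the left half when the right half produces no carry (objective: alternative).
-- Both Pythons mutate `arr` in place identically; the equivalence proved is about the RETURN value.

-- ===== PORT A =====
-- A's while loop, from now = arr.length - 1 down to 0; fuel = now + 1.
-- State: the (mutated) list and the carry flag `plus`; `none` = IndexError (type_arr too short).
def loopA (type_arr : List String) : Nat → List Int → Bool → Option (List Int × Bool)
  | 0, a, plus => some (a, plus)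
  | n+1, a, plus =>
    if plus then
      match PySem.List.pyGet? a (n : Int) with      -- arr[now] (always in range)
      | none => none
      | some v =>
        if v + 1 = 10 then
          match PySem.List.pyGet? type_arr (n : Int) with   -- type_arr[now]
          | none => none
          | some t => loopA type_arr n (a.set n (if t = "x" then 1 else 0)) true
        else loopA type_arr n (a.set n (v + 1)) false
    else loopA type_arr n a false

def next_possible (arr : List Int) (type_arr : List String) : Option (List Int) :=
  match loopA type_arr arr.length arr true with
  | none => none
  | some (a, plus) => if plus then none else some a   -- `return -1` (outside Pre_) ↦ none

-- ===== PORT B =====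
-- B's recursive inc(lo, hi) on segment halves; fuel only makes the recursion total in Lean
-- (every reachable call has lo < hi and enough fuel); `none` = IndexError, as in port A.
def incB (t : List String) : Nat → Nat → Nat → List Int → Option (List Int × Bool)
  | 0, _, _, _ => none
  | f+1, lo, hi, a =>
    if hi - lo = 1 then
      match PySem.List.pyGet? a (lo : Int) with          -- arr[lo] += 1
      | none => none
      | some v =>
        if v + 1 = 10 then
          match PySem.List.pyGet? t (lo : Int) with      -- type_arr[lo]
          | none => none
          | some s => some (a.set lo (if s = "x" then 1 else 0), true)
        else some (a.set lo (v + 1), false)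
    else
      match incB t f ((lo + hi) / 2) hi a with
      | none => none
      | some (a1, c) => if c then incB t f lo ((lo + hi) / 2) a1 else some (a1, false)

def next_possible_alt (arr : List Int) (type_arr : List String) : Option (List Int) :=
  if arr = [] then none                                   -- `return -1` (outside Pre_) ↦ none
  else
    match incB type_arr arr.length 0 arr.length arr with
    | none => none
    | some (a, c) => if c then none else some a

-- ===== PRECONDITION & SPEC =====
-- Pre_ excludes (a) inputs where the carry chain (a non-empty suffix of 9s, i.e. last element 9)
-- reaches an index type_arr lacks — there A raises IndexError — and (b) all-9 / empty arrays,
-- where A (and B) return the int -1, which is not a value of the declared Optional[list[int]]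
-- return type.
def Pre_next_possible (arr : List Int) (type_arr : List String) : Prop :=
  (∃ x ∈ arr, x ≠ 9) ∧ (arr.getLast? = some 9 → arr.length ≤ type_arr.length)
instance (arr : List Int) (type_arr : List String) : Decidable (Pre_next_possible arr type_arr) := by unfold Pre_next_possible; infer_instance

def pvWitness_next_possible : List Int × List String := ([1, 9], ["x", "y"])

def Spec_next_possible (arr : List Int) (type_arr : List String) (out : Option (List Int)) : Prop := out = next_possible_alt arr type_arr
instance (arr : List Int) (type_arr : List String) (out : Option (List Int)) : Decidable (Spec_next_possible arr type_arr out) := by unfold Spec_next_possible; infer_instance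

-- ===== CLAIM (what is proved, stated in full; the proofs are below) =====
def Claim_equal_next_possible : Prop := ∀ (arr : List Int) (type_arr : List String), Dom_next_possible arr type_arr → Pre_next_possible arr type_arr → Spec_next_possible arr type_arr (next_possible arr type_arr)

-- ===== LEMMAS AND PROOFS =====

-- the reset value both programs write at a carried-over position j
def rstV (type_arr : List String) (j : Nat) : Int := if type_arr.getD j "" = "x" then 1 else 0

theorem loopA_false (t : List String) : ∀ (n : Nat) (a : List Int), loopA t n a false = some (a, false) := by
  intro n
  induction n with
  | zero => intro a; simp [loopA]
  | succ n ih => intro a; simp [loopA, ih]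

theorem loopA_pivot (t : List String) : ∀ (n : Nat) (a : List Int) (i : Nat) (v : Int),
    i < n → n ≤ a.length → a[i]? = some v → v ≠ 9 →
    (∀ j, i < j → j < n → a[j]? = some 9) → (∀ j, i < j → j < n → j < t.length) →
    ∃ a', loopA t n a true = some (a', false) ∧ a'.length = a.length ∧
      ∀ j, a'[j]? = if j = i then some (v + 1) else if i < j ∧ j < n then some (rstV t j) else a[j]? := by
  intro n
  induction n with
  | zero => intro a i v h; omega
  | succ n ih =>
    intro a i v hi hlen hv hv9 h9 ht
    by_cases hin : n = i
    · have hvn : a[n]? = some v := by rw [hin]; exact hv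
      refine ⟨a.set n (v + 1), ?_, by simp, ?_⟩
      · simp only [loopA, PySem.List.pyGet?_natCast, hvn]
        have h10 : ¬ (v + 1 = 10) := by omega
        simp [h10, loopA_false]
      · intro j
        by_cases hj : j = n
        · subst hj
          rw [if_pos (by omega), List.getElem?_set_self]
          simp [show j < a.length by omega]
        · rw [List.getElem?_set_ne (by omega)]
          have hmid : ¬ (i < j ∧ j < n + 1) := by omega
          rw [if_neg (by omega), if_neg hmid]
    · have hin' : i < n := by omega
      have ha : a[n]? = some 9 := h9 n (by omega) (by omega)
      have htn : n < t.length := ht n (by omega) (by omega)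
      have htg : t[n]? = some (t.getD n "") := by
        rw [List.getD_eq_getElem?_getD, List.getElem?_eq_getElem htn]
        simp
      obtain ⟨a', h1, h2, h3⟩ := ih (a.set n (rstV t n)) i v hin'
        (by simp; omega)
        (by rw [List.getElem?_set_ne (by omega)]; exact hv) hv9
        (fun j h4 h5 => by rw [List.getElem?_set_ne (by omega)]; exact h9 j h4 (by omega))
        (fun j h4 h5 => ht j h4 (by omega))
      refine ⟨a', ?_, by simpa using h2, ?_⟩
      · simp only [loopA, PySem.List.pyGet?_natCast, ha, htg]
        simpa [rstV] using h1
      · intro j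
        rw [h3 j]
        by_cases hji : j = i
        · simp [hji]
        · rw [if_neg hji, if_neg hji]
          by_cases hjn : j = n
          · subst hjn
            rw [if_neg (by omega), if_pos (by omega), List.getElem?_set_self]
            simp [show j < a.length by omega]
          · by_cases hmid : i < j ∧ j < n
            · rw [if_pos hmid, if_pos (by omega)]
            · rw [if_neg hmid, if_neg (by omega), List.getElem?_set_ne (by omega)]

-- proof-side pivot search (rightmost non-9), used only to analyse the inputs admitted by Pre_
def pivotB (arr : List Int) : Nat → Option Nat
  | 0 => none
  | n+1 => if arr[n]? = some 9 then pivotB arr n else some n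

theorem pivotB_none (arr : List Int) : ∀ n, pivotB arr n = none ↔ ∀ j, j < n → arr[j]? = some 9 := by
  intro n
  induction n with
  | zero => simp [pivotB]
  | succ n ih =>
    simp only [pivotB]
    by_cases h : arr[n]? = some 9
    · rw [if_pos h, ih]
      constructor
      · intro hall j hj
        by_cases hjn : j = n
        · subst hjn; exact h
        · exact hall j (by omega)
      · intro hall j hj; exact hall j (by omega)
    · rw [if_neg h]
      constructor
      · intro hc; exact absurd hc (by simp)
      · intro hall; exact absurd (hall n (by omega)) h

theorem pivotB_some (arr : List Int) : ∀ n i, pivotB arr n = some i →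
    i < n ∧ arr[i]? ≠ some 9 ∧ ∀ j, i < j → j < n → arr[j]? = some 9 := by
  intro n
  induction n with
  | zero => intro i h; simp [pivotB] at h
  | succ n ih =>
    intro i h
    simp only [pivotB] at h
    by_cases h9 : arr[n]? = some 9
    · rw [if_pos h9] at h
      obtain ⟨h1, h2, h3⟩ := ih i h
      refine ⟨by omega, h2, fun j hj1 hj2 => ?_⟩
      by_cases hjn : j = n
      · subst hjn; exact h9
      · exact h3 j hj1 (by omega)
    · rw [if_neg h9] at h
      obtain rfl := Option.some_injective _ h
      exact ⟨by omega, h9, fun j hj1 hj2 => by omega⟩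

theorem incB_allnine (t : List String) : ∀ (f : Nat), ∀ (lo hi : Nat) (a : List Int),
    hi - lo ≤ f → lo < hi → hi ≤ a.length →
    (∀ j, lo ≤ j → j < hi → a[j]? = some 9) →
    (∀ j, lo ≤ j → j < hi → j < t.length) →
    ∃ a', incB t f lo hi a = some (a', true) ∧ a'.length = a.length ∧
      ∀ j, a'[j]? = if lo ≤ j ∧ j < hi then some (rstV t j) else a[j]? := by
  intro f
  induction f with
  | zero => intro lo hi a hf hlh; omega
  | succ f ih =>
    intro lo hi a hf hlh hha h9 ht
    by_cases h1 : hi - lo = 1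
    · have hlo : a[lo]? = some 9 := h9 lo (le_refl _) (by omega)
      have htl : lo < t.length := ht lo (le_refl _) (by omega)
      have htg : t[lo]? = some (t.getD lo "") := by
        rw [List.getD_eq_getElem?_getD, List.getElem?_eq_getElem htl]; simp
      refine ⟨a.set lo (rstV t lo), ?_, by simp, ?_⟩
      · simp only [incB, if_pos h1, PySem.List.pyGet?_natCast, hlo, htg]
        norm_num [rstV]
      · intro j
        by_cases hj : j = lo
        · subst hj
          rw [if_pos (by omega), List.getElem?_set_self]
          simp [show j < a.length by omega]
        · rw [List.getElem?_set_ne (by omega), if_neg (by omega)]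
    · have hmid1 : lo < (lo + hi) / 2 := by omega
      have hmid2 : (lo + hi) / 2 < hi := by omega
      obtain ⟨a1, g1, g2, g3⟩ := ih ((lo + hi) / 2) hi a (by omega) hmid2 hha
        (fun j hj1 hj2 => h9 j (by omega) hj2) (fun j hj1 hj2 => ht j (by omega) hj2)
      obtain ⟨a2, k1, k2, k3⟩ := ih lo ((lo + hi) / 2) a1 (by omega) hmid1 (by omega)
        (fun j hj1 hj2 => by rw [g3 j, if_neg (by omega)]; exact h9 j hj1 (by omega))
        (fun j hj1 hj2 => ht j hj1 (by omega))
      refine ⟨a2, ?_, by omega, ?_⟩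
      · simp [incB, if_neg h1, g1, k1]
      · intro j
        rw [k3 j, g3 j]
        by_cases hc1 : lo ≤ j ∧ j < (lo + hi) / 2
        · rw [if_pos hc1, if_pos (by omega)]
        · rw [if_neg hc1]
          by_cases hc2 : (lo + hi) / 2 ≤ j ∧ j < hi
          · rw [if_pos hc2, if_pos (by omega)]
          · rw [if_neg hc2, if_neg (by omega)]

theorem incB_pivot (t : List String) : ∀ (f : Nat), ∀ (lo hi : Nat) (a : List Int) (i : Nat) (v : Int),
    hi - lo ≤ f → lo < hi → hi ≤ a.length →
    lo ≤ i → i < hi → a[i]? = some v → v ≠ 9 →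
    (∀ j, i < j → j < hi → a[j]? = some 9) →
    (∀ j, i < j → j < hi → j < t.length) →
    ∃ a', incB t f lo hi a = some (a', false) ∧ a'.length = a.length ∧
      ∀ j, a'[j]? = if j = i then some (v + 1) else if i < j ∧ j < hi then some (rstV t j) else a[j]? := by
  intro f
  induction f with
  | zero => intro lo hi a i v hf hlh; omega
  | succ f ih =>
    intro lo hi a i v hf hlh hha hli hih hv hv9 h9 ht
    by_cases h1 : hi - lo = 1
    · have hil : i = lo := by omega
      subst hil
      refine ⟨a.set i (v + 1), ?_, by simp, ?_⟩
      · simp only [incB, if_pos h1, PySem.List.pyGet?_natCast, hv]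
        have h10 : ¬ (v + 1 = 10) := by omega
        simp [h10]
      · intro j
        by_cases hj : j = i
        · subst hj
          rw [if_pos rfl, List.getElem?_set_self]
          simp [show j < a.length by omega]
        · rw [List.getElem?_set_ne (by omega), if_neg hj, if_neg (by omega)]
    · have hmid1 : lo < (lo + hi) / 2 := by omega
      have hmid2 : (lo + hi) / 2 < hi := by omega
      by_cases him : (lo + hi) / 2 ≤ i
      · -- pivot lies in the right half: no carry, left half untouched
        obtain ⟨a1, g1, g2, g3⟩ := ih ((lo + hi) / 2) hi a i v (by omega) hmid2 hha him hih hv hv9 h9 ht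
        refine ⟨a1, ?_, g2, g3⟩
        simp [incB, if_neg h1, g1]
      · -- right half is all 9s: it carries, then the left half holds the pivot
        obtain ⟨a1, g1, g2, g3⟩ := incB_allnine t f ((lo + hi) / 2) hi a (by omega) hmid2 hha
          (fun j hj1 hj2 => h9 j (by omega) hj2) (fun j hj1 hj2 => ht j (by omega) hj2)
        obtain ⟨a2, k1, k2, k3⟩ := ih lo ((lo + hi) / 2) a1 i v (by omega) hmid1 (by omega)
          hli (by omega)
          (by rw [g3 i, if_neg (by omega)]; exact hv) hv9
          (fun j hj1 hj2 => by rw [g3 j, if_neg (by omega)]; exact h9 j hj1 (by omega))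
          (fun j hj1 hj2 => ht j hj1 (by omega))
        refine ⟨a2, ?_, by omega, ?_⟩
        · simp only [incB, if_neg h1, g1, k1, if_pos]
        · intro j
          rw [k3 j]
          by_cases hj : j = i
          · simp [hj]
          · rw [if_neg hj, if_neg hj, g3 j]
            by_cases hc1 : i < j ∧ j < (lo + hi) / 2
            · rw [if_pos hc1, if_pos (by omega)]
            · rw [if_neg hc1]
              by_cases hc2 : (lo + hi) / 2 ≤ j ∧ j < hi
              · rw [if_pos hc2, if_pos (by omega)]
              · rw [if_neg hc2, if_neg (by omega)]

-- getLast? as an indexed access, to connect Pre_ with the pointwise facts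
theorem getLast?_eq_last_index (arr : List Int) :
    arr.getLast? = arr[arr.length - 1]? := by
  rw [List.getLast?_eq_getElem?]

-- ===== VERDICT (by name: the statement is the Claim_ definition above) =====
theorem next_possible_spec : Claim_equal_next_possible := by
  intro arr t _dom pre
  unfold Spec_next_possible
  cases hpiv : pivotB arr arr.length with
  | none =>
    -- excluded by Pre_: all entries are 9 (or arr = []), where both Pythons return -1
    exfalso
    have hall : ∀ j, j < arr.length → arr[j]? = some 9 := (pivotB_none arr arr.length).mp hpiv
    obtain ⟨x, hx, hx9⟩ := pre.1
    obtain ⟨j, hj, rfl⟩ := List.getElem_of_mem hx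
    exact hx9 (by have := hall j hj; simpa [List.getElem?_eq_getElem hj] using this)
  | some i =>
    obtain ⟨hi, hne9, h9⟩ := pivotB_some arr arr.length i hpiv
    obtain ⟨v, hv⟩ : ∃ v, arr[i]? = some v := ⟨arr[i]'hi, List.getElem?_eq_getElem hi⟩
    have hv9 : v ≠ 9 := fun h => hne9 (by rw [hv, h])
    have htlen : ∀ j, i < j → j < arr.length → j < t.length := by
      intro j hj1 hj2
      have hle : arr.length ≤ t.length := by
        apply pre.2
        rw [getLast?_eq_last_index arr]
        exact h9 _ (by omega) (by omega)
      omega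
    have hne : arr ≠ [] := by
      intro h; subst h; simp at hi
    obtain ⟨aA, h1, h2, h3⟩ := loopA_pivot t arr.length arr i v hi (le_refl _) hv hv9 h9 htlen
    obtain ⟨aB, g1, g2, g3⟩ := incB_pivot t arr.length 0 arr.length arr i v (by omega)
      (by omega) (le_refl _) (by omega) hi hv hv9 h9 htlen
    have hAB : aA = aB := by
      apply List.ext_getElem?
      intro j
      rw [h3 j, g3 j]
    simp [next_possible, next_possible_alt, hne, h1, g1, hAB]
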